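-- pv_equiv track=rewrite | github.com/immalopez/graded_readers_stats | tests/test_locations.py | transpose_ctx_terms_to_docs_locations
-- ===== SOURCE A (Python) =====
-- def transpose_ctx_terms_to_docs_locations(
--         ctxs_locs_by_terms,
--         terms_count,
--         docs_count,
-- ):
--     ctxs_locs_by_docs = [[] for _ in range(docs_count)]
--     for ti, t in enumerate(ctxs_locs_by_terms):
--         for ci, c in enumerate(t):
--             for di, d in enumerate(c):
--                 if len(d):
--                     while len(ctxs_locs_by_docs[di]) <= ci:
--                         ctxs_locs_by_docs[di].append(
--                             [[] for _ in range(terms_count)]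
--                         )
--                     ctxs_locs_by_docs[di][ci][ti] = d
--     # Note: d = doc, c = context word, t = term
--     return ctxs_locs_by_docs
-- ===== SOURCE B (Python) =====
-- def transpose_ctx_terms_to_docs_locations(
--         ctxs_locs_by_terms,
--         terms_count,
--         docs_count,
-- ):
--     # Pass 1: compute how many context slots each doc needs (size-first).
--     needed_len = [0] * docs_count
--     for t in ctxs_locs_by_terms:
--         for ci, c in enumerate(t):
--             for di, d in enumerate(c):
--                 if len(d) and needed_len[di] < ci + 1:
--                     needed_len[di] = ci + 1
--     # Build the fully-initialized structure in one go.
--     ctxs_locs_by_docs = [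
--         [[[] for _ in range(terms_count)] for _ in range(n)]
--         for n in needed_len
--     ]
--     # Pass 2: fill in the non-empty leaves.
--     for ti, t in enumerate(ctxs_locs_by_terms):
--         for ci, c in enumerate(t):
--             for di, d in enumerate(c):
--                 if len(d):
--                     ctxs_locs_by_docs[di][ci][ti] = d
--     return ctxs_locs_by_docs
-- ===== Notes on version B (the rewrite author's own statement) =====
-- stated objective: alternative
-- what changed: Replaced A's on-demand while-loop growth of each doc's context list with a size-first decomposition: one pass computes each doc's required length, the whole output is allocated fully initialized, and a second pass assigns the non-empty leaves.
import Mathlib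
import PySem

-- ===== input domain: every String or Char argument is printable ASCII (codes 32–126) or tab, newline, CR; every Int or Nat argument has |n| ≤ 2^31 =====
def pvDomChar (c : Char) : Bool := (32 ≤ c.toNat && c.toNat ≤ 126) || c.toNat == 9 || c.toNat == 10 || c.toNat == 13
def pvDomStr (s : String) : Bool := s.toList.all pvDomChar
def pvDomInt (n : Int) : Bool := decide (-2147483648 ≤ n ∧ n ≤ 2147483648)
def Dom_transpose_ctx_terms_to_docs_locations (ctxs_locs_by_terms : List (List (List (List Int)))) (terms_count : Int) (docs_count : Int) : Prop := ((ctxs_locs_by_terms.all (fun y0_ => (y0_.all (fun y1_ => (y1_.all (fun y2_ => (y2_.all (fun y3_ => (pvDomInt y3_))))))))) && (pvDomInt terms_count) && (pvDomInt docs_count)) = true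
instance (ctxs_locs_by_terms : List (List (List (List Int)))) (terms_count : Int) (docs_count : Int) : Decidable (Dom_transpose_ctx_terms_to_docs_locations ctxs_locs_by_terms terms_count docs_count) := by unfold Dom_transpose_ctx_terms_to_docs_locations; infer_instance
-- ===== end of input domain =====

-- B replaces A's on-demand while-loop growth by a size-first decomposition (compute each
-- doc's needed length, allocate everything, then fill); same cost, different structure.

-- Both Pythons share the same triple 'for ti / for ci / for di' enumerate loop; this helper
-- is that loop shape, each port supplies its own body g.
def pvFoldLeaves {σ : Type} (ctxs : List (List (List (List Int))))
    (g : σ → Nat → Nat → Nat → List Int → σ) (init : σ) : σ :=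
  ctxs.zipIdx.foldl (fun acc tp =>
    tp.1.zipIdx.foldl (fun acc cp =>
      cp.1.zipIdx.foldl (fun acc dp => g acc tp.2 cp.2 dp.2 dp.1) acc) acc) init

-- ===== PORT A =====
-- [[] for _ in range(terms_count)]
def pvBlankRow (terms_count : Int) : List (List Int) :=
  (List.range terms_count.toNat).map (fun _ => ([] : List Int))

-- the 'while len(ctxs_locs_by_docs[di]) <= ci: append(...)' loop
def pvGrowA (dl : List (List (List Int))) (ci : Nat) (terms_count : Int) :
    List (List (List Int)) :=
  if dl.length ≤ ci then pvGrowA (dl ++ [pvBlankRow terms_count]) ci terms_count else dl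
termination_by ci + 1 - dl.length

def transpose_ctx_terms_to_docs_locations (ctxs_locs_by_terms : List (List (List (List Int)))) (terms_count : Int) (docs_count : Int) : List (List (List (List Int))) :=
  pvFoldLeaves ctxs_locs_by_terms
    (fun acc ti ci di d =>
      if d.length ≠ 0 then
        acc.modify di (fun dl => (pvGrowA dl ci terms_count).modify ci (fun row => row.set ti d))
      else acc)
    ((List.range docs_count.toNat).map (fun _ => []))

-- ===== PORT B =====
def transpose_ctx_terms_to_docs_locations_alt (ctxs_locs_by_terms : List (List (List (List Int)))) (terms_count : Int) (docs_count : Int) : List (List (List (List Int))) :=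
  -- pass 1: needed_len[di] = max over non-empty leaves of ci+1
  let needed : List Nat :=
    pvFoldLeaves ctxs_locs_by_terms
      (fun nd _ti ci di d =>
        if d.length ≠ 0 then nd.modify di (fun n => if n < ci + 1 then ci + 1 else n) else nd)
      (List.replicate docs_count.toNat 0)
  -- allocate the fully-initialized structure
  let base : List (List (List (List Int))) :=
    needed.map (fun n => (List.range n).map (fun _ => pvBlankRow terms_count))
  -- pass 2: fill the non-empty leaves
  pvFoldLeaves ctxs_locs_by_terms
    (fun acc ti ci di d =>
      if d.length ≠ 0 then
        acc.modify di (fun dl => dl.modify ci (fun row => row.set ti d))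
      else acc)
    base

-- ===== PRECONDITION & SPEC =====
-- Pre_ excludes exactly the inputs where the Python A raises IndexError: a non-empty leaf
-- whose doc index reaches docs_count or whose term index reaches terms_count.
def Pre_transpose_ctx_terms_to_docs_locations (ctxs_locs_by_terms : List (List (List (List Int)))) (terms_count : Int) (docs_count : Int) : Prop :=
  ∀ tp ∈ ctxs_locs_by_terms.zipIdx, ∀ cp ∈ tp.1.zipIdx, ∀ dp ∈ cp.1.zipIdx,
    dp.1 ≠ [] → ((dp.2 : Int) < docs_count ∧ (tp.2 : Int) < terms_count)
instance (ctxs_locs_by_terms : List (List (List (List Int)))) (terms_count : Int) (docs_count : Int) : Decidable (Pre_transpose_ctx_terms_to_docs_locations ctxs_locs_by_terms terms_count docs_count) := by unfold Pre_transpose_ctx_terms_to_docs_locations; infer_instance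

def pvWitness_transpose_ctx_terms_to_docs_locations : List (List (List (List Int))) × Int × Int :=
  ([[[[1, 2]], [[], [3]]]], 1, 2)

def Spec_transpose_ctx_terms_to_docs_locations (ctxs_locs_by_terms : List (List (List (List Int)))) (terms_count : Int) (docs_count : Int) (out : List (List (List (List Int)))) : Prop := out = transpose_ctx_terms_to_docs_locations_alt ctxs_locs_by_terms terms_count docs_count
instance (ctxs_locs_by_terms : List (List (List (List Int)))) (terms_count : Int) (docs_count : Int) (out : List (List (List (List Int)))) : Decidable (Spec_transpose_ctx_terms_to_docs_locations ctxs_locs_by_terms terms_count docs_count out) := by unfold Spec_transpose_ctx_terms_to_docs_locations; infer_instance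

-- ===== CLAIM (what is proved, stated in full; the proofs are below) =====
def Claim_equal_transpose_ctx_terms_to_docs_locations : Prop := ∀ (ctxs_locs_by_terms : List (List (List (List Int)))) (terms_count : Int) (docs_count : Int), Dom_transpose_ctx_terms_to_docs_locations ctxs_locs_by_terms terms_count docs_count → Pre_transpose_ctx_terms_to_docs_locations ctxs_locs_by_terms terms_count docs_count → Spec_transpose_ctx_terms_to_docs_locations ctxs_locs_by_terms terms_count docs_count (transpose_ctx_terms_to_docs_locations ctxs_locs_by_terms terms_count docs_count)

-- ===== LEMMAS AND PROOFS =====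

-- the flat list of leaves (ti, ci, di, d) in traversal order
def pvLeaves (ctxs : List (List (List (List Int)))) : List (Nat × Nat × Nat × List Int) :=
  ctxs.zipIdx.flatMap (fun tp =>
    tp.1.zipIdx.flatMap (fun cp =>
      cp.1.zipIdx.map (fun dp => (tp.2, cp.2, dp.2, dp.1))))

theorem pvFoldLeaves_eq_foldl {σ : Type} (ctxs : List (List (List (List Int))))
    (g : σ → Nat → Nat → Nat → List Int → σ) (init : σ) :
    pvFoldLeaves ctxs g init =
      (pvLeaves ctxs).foldl (fun acc q => g acc q.1 q.2.1 q.2.2.1 q.2.2.2) init := by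
  simp [pvFoldLeaves, pvLeaves, List.foldl_flatMap, List.foldl_map]

-- the three step functions
def pvStepA (tc : Int) (acc : List (List (List (List Int)))) (q : Nat × Nat × Nat × List Int) :
    List (List (List (List Int))) :=
  if q.2.2.2.length ≠ 0 then
    acc.modify q.2.2.1 (fun dl => (pvGrowA dl q.2.1 tc).modify q.2.1 (fun row => row.set q.1 q.2.2.2))
  else acc

def pvStepGrow (tc : Int) (acc : List (List (List (List Int)))) (q : Nat × Nat × Nat × List Int) :
    List (List (List (List Int))) :=
  if q.2.2.2.length ≠ 0 then acc.modify q.2.2.1 (fun dl => pvGrowA dl q.2.1 tc) else acc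

def pvStepFill (acc : List (List (List (List Int)))) (q : Nat × Nat × Nat × List Int) :
    List (List (List (List Int))) :=
  if q.2.2.2.length ≠ 0 then
    acc.modify q.2.2.1 (fun dl => dl.modify q.2.1 (fun row => row.set q.1 q.2.2.2))
  else acc

def pvStepNeed (nd : List Nat) (q : Nat × Nat × Nat × List Int) : List Nat :=
  if q.2.2.2.length ≠ 0 then nd.modify q.2.2.1 (fun n => if n < q.2.1 + 1 then q.2.1 + 1 else n) else nd

-- generic modify lemmas
theorem modify_congr_at {α : Type} (l : List α) (i : Nat) (f g : α → α)
    (h : ∀ a, l[i]? = some a → f a = g a) : l.modify i f = l.modify i g := by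
  apply List.ext_getElem?
  intro j
  simp only [List.getElem?_modify]
  cases hj : l[j]? with
  | none => simp
  | some a =>
    by_cases hij : i = j
    · subst hij; simp [h a hj]
    · simp [hij]

theorem modify_modify_same {α : Type} (l : List α) (i : Nat) (f g : α → α) :
    (l.modify i f).modify i g = l.modify i (fun a => g (f a)) := by
  apply List.ext_getElem?
  intro j
  simp only [List.getElem?_modify]
  cases hj : l[j]? <;> by_cases hij : i = j <;> simp [hij]

theorem modify_modify_ne {α : Type} (l : List α) (i j : Nat) (f g : α → α) (hij : i ≠ j) :
    (l.modify i f).modify j g = (l.modify j g).modify i f := by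
  apply List.ext_getElem?
  intro k
  simp only [List.getElem?_modify]
  cases hk : l[k]? with
  | none => simp
  | some a =>
    by_cases hik : i = k
    · have hjk : ¬ (j = k) := fun h => hij (hik.trans h.symm)
      simp [hik, hjk]
    · by_cases hjk : j = k <;> simp [hik, hjk]

theorem modify_append_left {α : Type} (l r : List α) (i : Nat) (f : α → α) (h : i < l.length) :
    (l ++ r).modify i f = l.modify i f ++ r := by
  apply List.ext_getElem?
  intro j
  by_cases hj : j < l.length
  · rw [List.getElem?_modify, List.getElem?_append_left hj,
      List.getElem?_append_left (show j < (l.modify i f).length by simpa using hj),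
      List.getElem?_modify]
  · have h1 : (l ++ r)[j]? = r[j - l.length]? := List.getElem?_append_right (by omega)
    have h2 : (l.modify i f ++ r)[j]? = r[j - (l.modify i f).length]? :=
      List.getElem?_append_right (by simp; omega)
    rw [List.getElem?_modify, h1, h2, List.length_modify]
    have hij : i ≠ j := by omega
    cases hr : r[j - l.length]? <;> simp [hij]

-- characterization of the while-loop growth
theorem pvGrowA_eq (dl : List (List (List Int))) (ci : Nat) (tc : Int) :
    pvGrowA dl ci tc = dl ++ List.replicate (ci + 1 - dl.length) (pvBlankRow tc) := by
  by_cases h : dl.length ≤ ci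
  · rw [pvGrowA]
    simp only [h, if_true]
    rw [pvGrowA_eq (dl ++ [pvBlankRow tc]) ci tc]
    rw [List.append_assoc]
    congr 1
    have heq : ci + 1 - dl.length = (ci + 1 - (dl ++ [pvBlankRow tc]).length) + 1 := by
      simp; omega
    rw [heq, List.replicate_succ]
    rfl
  · rw [pvGrowA]
    simp only [h, if_false]
    have heq : ci + 1 - dl.length = 0 := by omega
    simp [heq]
termination_by ci + 1 - dl.length
decreasing_by simp; omega

theorem pvGrowA_length (dl : List (List (List Int))) (ci : Nat) (tc : Int) :
    (pvGrowA dl ci tc).length = max dl.length (ci + 1) := by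
  rw [pvGrowA_eq]; simp; omega

theorem pvGrowA_replicate (n ci : Nat) (tc : Int) :
    pvGrowA (List.replicate n (pvBlankRow tc)) ci tc =
      List.replicate (if n < ci + 1 then ci + 1 else n) (pvBlankRow tc) := by
  rw [pvGrowA_eq, ← List.replicate_add]
  congr 1
  simp only [List.length_replicate]
  split_ifs <;> omega

-- cell-exists invariant: the cell (di, ci) exists in s
def pvCell (s : List (List (List (List Int)))) (di ci : Nat) : Prop :=
  di < s.length → ci < (s[di]?.getD []).length

theorem pvCell_stepGrow (s : List (List (List (List Int)))) (di ci : Nat) (tc : Int)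
    (q : Nat × Nat × Nat × List Int) (h : pvCell s di ci) : pvCell (pvStepGrow tc s q) di ci := by
  unfold pvStepGrow pvCell at *
  split
  · intro hd
    rw [List.length_modify] at hd
    rw [List.getElem?_modify]
    cases hs : s[di]? with
    | none => rw [List.getElem?_eq_none_iff] at hs; omega
    | some a =>
      have hha := h hd
      rw [hs] at hha
      simp only [Option.getD_some] at hha
      by_cases hq : q.2.2.1 = di
      · simp [hs, hq, pvGrowA_length]
        omega
      · simp [hs, hq]
        exact hha
  · exact h

theorem pvCell_stepGrow_self (s : List (List (List (List Int)))) (tc : Int)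
    (q : Nat × Nat × Nat × List Int) (hx : q.2.2.2.length ≠ 0) :
    pvCell (pvStepGrow tc s q) q.2.2.1 q.2.1 := by
  unfold pvStepGrow pvCell
  rw [if_pos hx]
  intro hd
  rw [List.length_modify] at hd
  rw [List.getElem?_modify]
  cases hs : s[q.2.2.1]? with
  | none => rw [List.getElem?_eq_none_iff] at hs; omega
  | some a =>
    simp [hs, pvGrowA_length]

-- single-step commutation: a fill whose cell exists commutes with a grow step
theorem fill_grow_comm (tc : Int) (s : List (List (List (List Int))))
    (x y : Nat × Nat × Nat × List Int) (h : pvCell s x.2.2.1 x.2.1) :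
    pvStepGrow tc (pvStepFill s x) y = pvStepFill (pvStepGrow tc s y) x := by
  unfold pvStepFill pvStepGrow
  by_cases hx : x.2.2.2.length ≠ 0
  · by_cases hy : y.2.2.2.length ≠ 0
    · rw [if_pos hx, if_pos hy, if_pos hy, if_pos hx]
      by_cases hd : y.2.2.1 = x.2.2.1
      · rw [hd]
        rw [modify_modify_same, modify_modify_same]
        apply modify_congr_at
        intro a ha
        have hdi : x.2.2.1 < s.length := (List.getElem?_eq_some_iff.mp ha).1
        have hc : x.2.1 < a.length := by
          have := h hdi
          rw [ha] at this
          simpa using this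
        rw [pvGrowA_eq, pvGrowA_eq, List.length_modify,
          modify_append_left _ _ _ _ hc]
      · exact modify_modify_ne s x.2.2.1 y.2.2.1 _ _ (fun hh => hd hh.symm)
    · rw [if_neg hy, if_neg hy]
  · rw [if_neg hx, if_neg hx]
  
-- fill commutes past a whole list of grows
theorem fill_foldl_grow_comm (tc : Int) (L : List (Nat × Nat × Nat × List Int))
    (s : List (List (List (List Int)))) (x : Nat × Nat × Nat × List Int)
    (h : pvCell s x.2.2.1 x.2.1) :
    L.foldl (pvStepGrow tc) (pvStepFill s x) = pvStepFill (L.foldl (pvStepGrow tc) s) x := by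
  induction L generalizing s with
  | nil => rfl
  | cons y L ih =>
    simp only [List.foldl_cons]
    rw [fill_grow_comm tc s x y h]
    exact ih (pvStepGrow tc s y) (pvCell_stepGrow s _ _ tc y h)

theorem stepA_eq_fill_grow (tc : Int) (s : List (List (List (List Int))))
    (x : Nat × Nat × Nat × List Int) :
    pvStepA tc s x = pvStepFill (pvStepGrow tc s x) x := by
  unfold pvStepA pvStepFill pvStepGrow
  by_cases hx : x.2.2.2.length ≠ 0
  · rw [if_pos hx, if_pos hx, if_pos hx, modify_modify_same]
  · rw [if_neg hx, if_neg hx, if_neg hx]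

-- the main decomposition: A's interleaved fold = grow-only fold, then fill-only fold
theorem foldA_eq_fill_of_grow (tc : Int) (L : List (Nat × Nat × Nat × List Int))
    (s : List (List (List (List Int)))) :
    L.foldl (pvStepA tc) s = L.foldl pvStepFill (L.foldl (pvStepGrow tc) s) := by
  induction L generalizing s with
  | nil => rfl
  | cons x L ih =>
    simp only [List.foldl_cons]
    rw [ih (pvStepA tc s x)]
    congr 1
    rw [stepA_eq_fill_grow]
    by_cases hx : x.2.2.2.length ≠ 0
    · exact fill_foldl_grow_comm tc L (pvStepGrow tc s x) x (pvCell_stepGrow_self s tc x hx)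
    · have hfill : ∀ t, pvStepFill t x = t := by
        intro t; unfold pvStepFill; rw [if_neg hx]
      rw [hfill, hfill]

-- grow-only fold on a replicate-structured state tracks the needed-length fold
theorem grow_fold_eq_need (tc : Int) (L : List (Nat × Nat × Nat × List Int)) (nd : List Nat) :
    L.foldl (pvStepGrow tc) (nd.map (fun n => List.replicate n (pvBlankRow tc))) =
      (L.foldl pvStepNeed nd).map (fun n => List.replicate n (pvBlankRow tc)) := by
  induction L generalizing nd with
  | nil => rfl
  | cons x L ih =>
    simp only [List.foldl_cons]
    rw [← ih]
    congr 1
    unfold pvStepGrow pvStepNeed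
    by_cases hx : x.2.2.2.length ≠ 0
    · rw [if_pos hx, if_pos hx]
      apply List.ext_getElem?
      intro j
      simp only [List.getElem?_modify, List.getElem?_map]
      cases hj : nd[j]? with
      | none => simp
      | some n =>
        by_cases hij : x.2.2.1 = j
        · simp [hij, hj, pvGrowA_replicate]
        · simp [hij, hj]
    · rw [if_neg hx, if_neg hx]

-- ===== VERDICT (by name: the statement is the Claim_ definition above) =====
theorem transpose_ctx_terms_to_docs_locations_spec : Claim_equal_transpose_ctx_terms_to_docs_locations := by
  intro ctxs tc dc _ _
  unfold Spec_transpose_ctx_terms_to_docs_locations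
  unfold transpose_ctx_terms_to_docs_locations transpose_ctx_terms_to_docs_locations_alt
  rw [pvFoldLeaves_eq_foldl, pvFoldLeaves_eq_foldl, pvFoldLeaves_eq_foldl]
  show (pvLeaves ctxs).foldl (pvStepA tc) _ =
    (pvLeaves ctxs).foldl pvStepFill
      (((pvLeaves ctxs).foldl pvStepNeed (List.replicate dc.toNat 0)).map
        (fun n => (List.range n).map (fun _ => pvBlankRow tc)))
  rw [foldA_eq_fill_of_grow]
  congr 1
  have hinit : ((List.range dc.toNat).map (fun _ => ([] : List (List (List Int))))) =
      ((List.replicate dc.toNat (0 : Nat)).map (fun n => List.replicate n (pvBlankRow tc))) := by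
    apply List.ext_getElem?
    intro j
    simp
  rw [hinit, grow_fold_eq_need]
  apply List.map_congr_left
  intro n _
  apply List.ext_getElem?
  intro j
  simp
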